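-- pv_equiv track=rewrite | github.com/Colin-Christon/CODECHEF | Starter88/Chef_and_Asteroids.py | calculate_probability
-- ===== SOURCE A (Python) =====
-- def inverse(num):
--     mod =10**9+7
--     a = mod-2
--     result = 1
--     result=pow(num,a,mod)
--     return result
--
-- def calculate_probability(n,l,fact):
--     d={}
--     for n1,n2 in l:
--         if n1 in d:
--             d[n1]+=1
--         else:
--             d[n1]=1
--
--     mod=10**9+7
--     nume=1
--     for i in d:
--         nume=(nume*fact[d[i]])%mod
--
--     deno=fact[-1]
--     inv=inverse(deno)
--
--     probability=(nume*inv)%mod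
--     return probability
-- ===== SOURCE B (Python) =====
-- def calculate_probability(n, l, fact):
--     mod = 10 ** 9 + 7
--     s = sorted(l, key=lambda p: p[0])  # sorted copy; l is not mutated
--     nume = 1
--     cur = None
--     run = 0
--     for n1, _n2 in s:
--         if cur is not None and n1 == cur:
--             run += 1
--         else:
--             if cur is not None:
--                 nume = (nume * fact[run]) % mod
--             cur = n1
--             run = 1
--     if cur is not None:
--         nume = (nume * fact[run]) % mod
--     return (nume * pow(fact[-1], mod - 2, mod)) % mod
-- ===== Notes on version B (the rewrite author's own statement) =====
-- stated objective: alternative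
-- what changed: replaces the dict-based grouping (count per first element in a hash map, then a second loop over the map) by sorting a copy of l on the first component and computing run lengths in a single scan, multiplying the numerator at each key change
import Mathlib
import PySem

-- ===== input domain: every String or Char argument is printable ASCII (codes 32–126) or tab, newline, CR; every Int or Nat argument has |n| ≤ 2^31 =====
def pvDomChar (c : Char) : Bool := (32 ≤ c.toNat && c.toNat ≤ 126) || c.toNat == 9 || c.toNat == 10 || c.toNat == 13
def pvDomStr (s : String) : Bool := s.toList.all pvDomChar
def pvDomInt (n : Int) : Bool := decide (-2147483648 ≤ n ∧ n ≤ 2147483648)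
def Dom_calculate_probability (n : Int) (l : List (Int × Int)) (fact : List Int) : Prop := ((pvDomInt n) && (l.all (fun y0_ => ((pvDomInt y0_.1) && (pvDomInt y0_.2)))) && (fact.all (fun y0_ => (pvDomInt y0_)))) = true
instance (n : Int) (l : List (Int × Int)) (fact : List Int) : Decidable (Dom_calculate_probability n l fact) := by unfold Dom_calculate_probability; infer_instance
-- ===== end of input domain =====

-- B replaces A's dict-based grouping by sorting a copy of l on the first component and a
-- single run-length scan (alternative decomposition, same exact result; l is never mutated).

-- ===== PORT A =====
-- three-argument pow(b, e, m) of Python, hand-ported as binary square-and-multiply so it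
-- evaluates fast; exact for m > 0 and e ≥ 0 (PySem.Int.mod is Python's %), the only way
-- both Pythons call it (m = 10^9+7, e = m-2)
def pvPowMod (b : Int) (e : Nat) (m : Int) : Int :=
  if h : e = 0 then PySem.Int.mod 1 m
  else
    let hrec := pvPowMod b (e / 2) m
    let sq := PySem.Int.mod (hrec * hrec) m
    if e % 2 = 0 then sq else PySem.Int.mod (sq * b) m
decreasing_by exact Nat.div_lt_self (Nat.pos_of_ne_zero h) (by omega)

-- pow(num, mod-2, mod): the exponent is the nonnegative literal mod-2, so .toNat is exact
def pvInverse (num : Int) : Int :=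
  let md : Int := 10 ^ 9 + 7
  let a : Int := md - 2
  pvPowMod num a.toNat md

def calculate_probability (n : Int) (l : List (Int × Int)) (fact : List Int) : Int :=
  let d : PySem.Dict Int Int := l.foldl (fun d p =>
      match d.get? p.1 with
      | some v => d.insert p.1 (v + 1)
      | none   => d.insert p.1 1) PySem.Dict.empty
  let md : Int := 10 ^ 9 + 7
  let nume : Int := d.keys.foldl (fun nume i => (nume * PySem.List.pyGetD fact (d.getD i 0) 0) % md) 1
  let deno := PySem.List.pyGetD fact (-1) 0
  let inv := pvInverse deno
  (nume * inv) % md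

-- ===== PORT B =====
-- loop body of Source B's scan (cur, run, nume are the state; x is the pair's first component)
def pvScanStep (fact : List Int) (st : Option Int × Int × Int) (x : Int) : Option Int × Int × Int :=
  match st with
  | (cur, run, nume) =>
    match cur with
    | some c =>
        if x = c then (some c, run + 1, nume)
        else (some x, 1, (nume * PySem.List.pyGetD fact run 0) % (10 ^ 9 + 7))
    | none => (some x, 1, nume)

def calculate_probability_alt (n : Int) (l : List (Int × Int)) (fact : List Int) : Int :=
  let md : Int := 10 ^ 9 + 7
  let s := PySem.List.sorted l (fun p => p.1) false
  let st := s.foldl (fun st p => pvScanStep fact st p.1) (none, 0, 1)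
  let nume : Int :=
    match st.1 with
    | some _ => (st.2.2 * PySem.List.pyGetD fact st.2.1 0) % md
    | none   => st.2.2
  (nume * pvPowMod (PySem.List.pyGetD fact (-1) 0) (md - 2).toNat md) % md

-- ===== PRECONDITION & SPEC =====
-- Pre_ excludes exactly the inputs where Python A raises IndexError: empty fact (fact[-1]),
-- or some group size ≥ len(fact) (fact[d[i]]).
def Pre_calculate_probability (n : Int) (l : List (Int × Int)) (fact : List Int) : Prop :=
  fact ≠ [] ∧ ∀ p ∈ l, (l.map Prod.fst).count p.1 < fact.length
instance (n : Int) (l : List (Int × Int)) (fact : List Int) : Decidable (Pre_calculate_probability n l fact) := by unfold Pre_calculate_probability; infer_instance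

def pvWitness_calculate_probability : Int × (List (Int × Int)) × List Int :=
  (0, [(1, 2), (1, 3), (2, 5)], [1, 1, 2, 6])

def Spec_calculate_probability (n : Int) (l : List (Int × Int)) (fact : List Int) (out : Int) : Prop := out = calculate_probability_alt n l fact
instance (n : Int) (l : List (Int × Int)) (fact : List Int) (out : Int) : Decidable (Spec_calculate_probability n l fact out) := by unfold Spec_calculate_probability; infer_instance

-- ===== CLAIM (what is proved, stated in full; the proofs are below) =====
def Claim_equal_calculate_probability : Prop := ∀ (n : Int) (l : List (Int × Int)) (fact : List Int), Dom_calculate_probability n l fact → Pre_calculate_probability n l fact → Spec_calculate_probability n l fact (calculate_probability n l fact)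

-- ===== LEMMAS AND PROOFS =====

def pvM : Int := 10 ^ 9 + 7

def pvG (fact : List Int) (r : Nat) : Int := PySem.List.pyGetD fact (r : Int) 0

def pvFinish (fact : List Int) (st : Option Int × Int × Int) : Int :=
  match st.1 with
  | some _ => (st.2.2 * PySem.List.pyGetD fact st.2.1 0) % pvM
  | none   => st.2.2

theorem pv_emod_mul_left (b x : Int) : (b % pvM * x) % pvM = (b * x) % pvM := by
  conv_rhs => rw [Int.mul_emod]
  rw [Int.mul_emod (b % pvM) x, Int.emod_emod_of_dvd b dvd_rfl]

theorem pv_foldl_mul_mod (f : Int → Int) (ks : List Int) (a : Int) :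
    ks.foldl (fun acc k => (acc * f k) % pvM) (a % pvM) = (a * (ks.map f).prod) % pvM := by
  induction ks generalizing a with
  | nil => simp
  | cons k ks ih =>
      rw [List.foldl_cons, pv_emod_mul_left a (f k), ih (a * f k)]
      simp [mul_assoc]

theorem pv_dictA_eq_counter (l : List (Int × Int)) :
    l.foldl (fun d p =>
      match d.get? p.1 with
      | some v => d.insert p.1 (v + 1)
      | none   => d.insert p.1 1) (PySem.Dict.empty : PySem.Dict Int Int)
    = PySem.Dict.counter (l.map Prod.fst) := by
  rw [← PySem.Dict.foldl_insert_getD_add_one_eq_counter, List.foldl_map]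
  apply PySem.List.foldl_congr_mem
  intro d p _
  cases h : d.get? p.1 with
  | some v => simp [PySem.Dict.getD, h]
  | none   => simp [PySem.Dict.getD, h]

theorem pv_prod_cons_counts (fact : List Int) (x : Int) (xs : List Int) :
    (∏ k ∈ (x :: xs).toFinset, pvG fact ((x :: xs).count k))
    = pvG fact (xs.count x + 1) * ∏ k ∈ xs.toFinset.erase x, pvG fact (xs.count k) := by
  rw [← Finset.mul_prod_erase ((x :: xs).toFinset) _ (show x ∈ (x :: xs).toFinset by simp)]
  rw [List.count_cons_self]
  congr 1
  rw [List.toFinset_cons, Finset.erase_insert_eq_erase]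
  apply Finset.prod_congr rfl
  intro k hk
  have hne := (Finset.mem_erase.mp hk).1
  simp [List.count_cons, Ne.symm hne]

theorem pv_scan_run (fact : List Int) : ∀ (xs : List Int) (c : Int) (r : Nat) (a : Int),
    xs.Pairwise (· ≤ ·) → (∀ x ∈ xs, c ≤ x) →
    pvFinish fact (xs.foldl (pvScanStep fact) (some c, (r : Int), a))
      = (a * pvG fact (r + xs.count c) * ∏ k ∈ xs.toFinset.erase c, pvG fact (xs.count k)) % pvM := by
  intro xs
  induction xs with
  | nil => intro c r a _ _; simp [pvFinish, pvG]
  | cons x xs ih =>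
      intro c r a hpw hc
      have hx : c ≤ x := hc x List.mem_cons_self
      rw [List.foldl_cons]
      by_cases hxc : x = c
      · subst hxc
        have hstep : pvScanStep fact (some x, (r : Int), a) x = (some x, ((r + 1 : Nat) : Int), a) := by
          simp [pvScanStep]
        rw [hstep, ih x (r + 1) a hpw.of_cons (fun y hy => ((List.pairwise_cons.mp hpw).1 y hy))]
        congr 1
        rw [List.count_cons_self, List.toFinset_cons, Finset.erase_insert_eq_erase]
        have hcnt : r + 1 + xs.count x = r + (xs.count x + 1) := by omega
        rw [hcnt]
        congr 1
        apply Finset.prod_congr rfl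
        intro k hk
        have hne := (Finset.mem_erase.mp hk).1
        simp [List.count_cons, Ne.symm hne]
      · have hlt : c < x := lt_of_le_of_ne hx (fun h => hxc h.symm)
        have hnot : c ∉ x :: xs := by
          intro hm
          rcases List.mem_cons.mp hm with h | h
          · exact hxc h.symm
          · exact absurd ((List.pairwise_cons.mp hpw).1 c h) (not_le.mpr hlt)
        have hstep : pvScanStep fact (some c, (r : Int), a) x
            = (some x, ((1 : Nat) : Int), (a * PySem.List.pyGetD fact (r : Int) 0) % pvM) := by
          simp [pvScanStep, hxc, pvM]
        rw [hstep, ih x 1 _ hpw.of_cons (fun y hy => ((List.pairwise_cons.mp hpw).1 y hy))]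
        have h0 : List.count c (x :: xs) = 0 := List.count_eq_zero.mpr hnot
        rw [h0, Nat.add_zero,
            show (x :: xs).toFinset.erase c = (x :: xs).toFinset from
              Finset.erase_eq_self.mpr (by simpa using hnot),
            pv_prod_cons_counts fact x xs]
        have h1n : (1 : Nat) + xs.count x = xs.count x + 1 := Nat.add_comm 1 _
        rw [h1n, mul_assoc ((a * PySem.List.pyGetD fact (r : Int) 0) % pvM), pv_emod_mul_left]
        rfl

-- the common value of both numerators
theorem pv_numeB (fact : List Int) (xs : List Int) (hpw : xs.Pairwise (· ≤ ·)) :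
    pvFinish fact (xs.foldl (pvScanStep fact) (none, 0, 1))
      = (∏ k ∈ xs.toFinset, pvG fact (xs.count k)) % pvM := by
  cases xs with
  | nil =>
      have h1 : (1 : Int) % pvM = 1 := by decide
      simp [pvFinish, h1]
  | cons x t =>
      rw [List.foldl_cons]
      have hstep : pvScanStep fact (none, 0, 1) x = (some x, ((1 : Nat) : Int), 1) := by
        simp [pvScanStep]
      rw [hstep, pv_scan_run fact t x 1 1 hpw.of_cons
            (fun y hy => ((List.pairwise_cons.mp hpw).1 y hy))]
      rw [pv_prod_cons_counts fact x t]
      have h1n : (1 : Nat) + t.count x = t.count x + 1 := Nat.add_comm 1 _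
      rw [h1n]
      congr 1 <;> ring

theorem pv_main (n : Int) (l : List (Int × Int)) (fact : List Int) :
    calculate_probability n l fact = calculate_probability_alt n l fact := by
  have hA : (PySem.Dict.counter (l.map Prod.fst)).keys.foldl
      (fun nume i => (nume * PySem.List.pyGetD fact ((PySem.Dict.counter (l.map Prod.fst)).getD i 0) 0) % pvM) 1
      = (∏ k ∈ (l.map Prod.fst).toFinset, pvG fact ((l.map Prod.fst).count k)) % pvM := by
    have h1 : (PySem.Dict.counter (l.map Prod.fst)).keys.foldl
        (fun nume i => (nume * PySem.List.pyGetD fact ((PySem.Dict.counter (l.map Prod.fst)).getD i 0) 0) % pvM) 1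
        = (PySem.Dict.counter (l.map Prod.fst)).keys.foldl
        (fun nume k => (nume * pvG fact ((l.map Prod.fst).count k)) % pvM) 1 := by
      apply PySem.List.foldl_congr_mem
      intro acc k _
      rw [PySem.Dict.getD_counter]
      rfl
    rw [h1]
    have h2 : (1 : Int) = 1 % pvM := by decide
    rw [h2, pv_foldl_mul_mod (fun k => pvG fact ((l.map Prod.fst).count k))]
    rw [one_mul, ← List.prod_toFinset _ (PySem.Dict.nodup_keys_counter (l.map Prod.fst))]
    congr 1
    apply Finset.prod_congr
    · ext a
      simp [PySem.Dict.keys_counter, PySem.Set.mem_ofList]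
    · intros; rfl
  have hperm : ((PySem.List.sorted l (fun p => p.1) false).map Prod.fst).Perm (l.map Prod.fst) :=
    (PySem.List.sorted_perm l (fun p => p.1) false).map Prod.fst
  have hpw : (((PySem.List.sorted l (fun p => p.1) false).map Prod.fst)).Pairwise (· ≤ ·) := by
    rw [List.pairwise_map]
    exact PySem.List.sorted_pairwise l (fun p => p.1)
  have hB := pv_numeB fact ((PySem.List.sorted l (fun p => p.1) false).map Prod.fst) hpw
  have hsetB : ((PySem.List.sorted l (fun p => p.1) false).map Prod.fst).toFinset = (l.map Prod.fst).toFinset := by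
    ext a; simp [hperm.mem_iff]
  have hcnt : ∀ k, ((PySem.List.sorted l (fun p => p.1) false).map Prod.fst).count k = (l.map Prod.fst).count k :=
    fun k => hperm.count_eq k
  rw [hsetB] at hB
  simp only [hcnt] at hB
  have hfold : (PySem.List.sorted l (fun p => p.1) false).foldl (fun st p => pvScanStep fact st p.1) (none, 0, 1)
      = ((PySem.List.sorted l (fun p => p.1) false).map Prod.fst).foldl (pvScanStep fact) (none, 0, 1) := by
    rw [List.foldl_map]
  simp only [calculate_probability, calculate_probability_alt, pvInverse]
  rw [pv_dictA_eq_counter l]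
  rw [show ((10 : Int) ^ 9 + 7) = pvM from rfl]
  rw [hA, hfold]
  generalize hst : List.foldl (pvScanStep fact) ((none : Option Int), (0 : Int), (1 : Int))
      ((PySem.List.sorted l (fun p => p.1) false).map Prod.fst) = st
  rw [hst] at hB
  obtain ⟨cur, run, nume⟩ := st
  cases cur with
  | none =>
      dsimp only [pvFinish] at hB ⊢
      rw [hB]
  | some c =>
      dsimp only [pvFinish] at hB ⊢
      rw [hB]

-- ===== VERDICT (by name: the statement is the Claim_ definition above) =====
theorem calculate_probability_spec : Claim_equal_calculate_probability := by
  intro n l fact _ _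
  unfold Spec_calculate_probability
  exact pv_main n l fact
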